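-- pv_equiv track=rewrite | github.com/Vivek-Kolhe/Solutions-Dump | CodeForces/46B. T-shirts from Sponsor.py | optimalsize
-- ===== SOURCE A (Python) =====
-- def optimalsize(store, size, sizes):
--   ind = sizes.index(size)
--   l, r = ind - 1, ind + 1
--   if store[size] > 0:
--     store[size] -= 1
--     return size
--   while l > -1 or r < 5:
--     if r < 5:
--       if store[sizes[r]] > 0:
--         store[sizes[r]] -= 1
--         return sizes[r]
--       r += 1
--     if l > -1:
--       if store[sizes[l]] > 0:
--         store[sizes[l]] -= 1
--         return sizes[l]
--       l -= 1
-- ===== SOURCE B (Python) =====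
-- def optimalsize(store, size, sizes):
--     ind = sizes.index(size)
--     for i in sorted(range(5), key=lambda i: (abs(i - ind), -i)):
--         s = sizes[i]
--         if store[s] > 0:
--             store[s] -= 1
--             return s
--     return None
-- ===== Notes on version B (the rewrite author's own statement) =====
-- stated objective: simpler
-- what changed: A's stateful two-pointer outward while-loop (l,r with interleaved bound checks) is replaced by computing the candidate index order once with sorted(range(5), key=(distance, -index)) and a single first-hit scan over that order.
-- outside the precondition, e.g. on optimalsize({'a': 1, 'b': 1}, 'b', ['a', 'a', 'a', 'a', 'a', 'b']): A returns 'b', B returns 'a'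
import Mathlib
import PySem

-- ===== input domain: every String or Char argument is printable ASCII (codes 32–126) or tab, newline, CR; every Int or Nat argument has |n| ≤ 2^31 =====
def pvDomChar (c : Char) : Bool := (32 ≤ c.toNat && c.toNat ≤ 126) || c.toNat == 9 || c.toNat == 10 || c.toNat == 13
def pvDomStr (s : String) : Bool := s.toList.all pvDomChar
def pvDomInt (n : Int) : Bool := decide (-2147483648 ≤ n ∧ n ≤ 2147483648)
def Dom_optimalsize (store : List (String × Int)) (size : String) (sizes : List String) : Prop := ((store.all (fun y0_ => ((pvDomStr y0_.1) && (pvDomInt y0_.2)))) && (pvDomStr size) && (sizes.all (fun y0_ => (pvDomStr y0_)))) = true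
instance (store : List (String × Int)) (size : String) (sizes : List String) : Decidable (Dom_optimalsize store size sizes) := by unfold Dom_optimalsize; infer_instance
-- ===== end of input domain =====

-- B replaces A's two-pointer outward while-loop by a precomputed candidate order plus one
-- first-hit scan (same return values; both Pythons decrement the found entry of `store` in
-- place — the equivalence proved here is about the RETURN value).

-- ===== PORT A =====
-- A's `while l > -1 or r < 5` loop; dict lookups that would raise KeyError/IndexError return none here (excluded by Pre_).
def optimalsizeLoopA (store : List (String × Int)) (sizes : List String) (l r : Int) : Option String :=
  if l > -1 ∨ r < 5 then
    if _hr : r < 5 then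
      match PySem.List.pyGet? sizes r with
      | none => none
      | some s =>
        match (PySem.Dict.mk store).get? s with
        | none => none
        | some v =>
          if 0 < v then some s
          else
            if _hl : l > -1 then
              match PySem.List.pyGet? sizes l with
              | none => none
              | some t =>
                match (PySem.Dict.mk store).get? t with
                | none => none
                | some w =>
                  if 0 < w then some t
                  else optimalsizeLoopA store sizes (l - 1) (r + 1)
            else optimalsizeLoopA store sizes l (r + 1)
    else
      if _hl : l > -1 then
        match PySem.List.pyGet? sizes l with
        | none => none
        | some t =>
          match (PySem.Dict.mk store).get? t with
          | none => none
          | some w =>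
            if 0 < w then some t
            else optimalsizeLoopA store sizes (l - 1) r
      else none
  else none
termination_by ((l + 1).toNat + (5 - r).toNat)
decreasing_by all_goals omega

def optimalsize (store : List (String × Int)) (size : String) (sizes : List String) : Option String :=
  match PySem.List.index? sizes size with
  | none => none          -- ValueError: size not in sizes (excluded by Pre_)
  | some ind =>
    match (PySem.Dict.mk store).get? size with
    | none => none        -- KeyError (excluded by Pre_)
    | some v =>
      if 0 < v then some size
      else optimalsizeLoopA store sizes ((ind : Int) - 1) ((ind : Int) + 1)

-- ===== PORT B =====
-- first-hit scan over a list of candidate indices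
def optimalsizeScanB (store : List (String × Int)) (sizes : List String) : List Int → Option String
  | [] => none
  | i :: rest =>
    match PySem.List.pyGet? sizes i with
    | none => none        -- IndexError (excluded by Pre_)
    | some s =>
      match (PySem.Dict.mk store).get? s with
      | none => none      -- KeyError (excluded by Pre_)
      | some v => if 0 < v then some s else optimalsizeScanB store sizes rest

def optimalsize_alt (store : List (String × Int)) (size : String) (sizes : List String) : Option String :=
  match PySem.List.index? sizes size with
  | none => none          -- ValueError (excluded by Pre_)
  | some ind =>
    optimalsizeScanB store sizes
      (PySem.List.sorted2 (PySem.List.pyRange 0 5 1) (fun i => |i - (ind : Int)|) (fun i => -i))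

-- ===== PRECONDITION & SPEC =====
-- Closed-form helpers for Pre_: A probes sizes in the order  ind, ind+1, ind-1, ind+2, ...  (position
-- pvPos); pvGood j = index j holds an available size; pvOkBefore = some available size is probed
-- strictly before position p.
def pvPos (ind j : Nat) : Nat := if ind < j then 2 * (j - ind) - 1 else 2 * (ind - j)
def pvGood (store : List (String × Int)) (sizes : List String) (j : Nat) : Bool :=
  decide (j < sizes.length) &&
    match (PySem.Dict.mk store).get? (sizes.getD j "") with
    | some v => decide (0 < v)
    | none => false
def pvOkBefore (store : List (String × Int)) (sizes : List String) (ind p : Nat) : Bool :=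
  (List.range 5).any (fun j => pvGood store sizes j && decide (pvPos ind j < p))

-- Pre_ is exactly the inputs on which A returns normally (size occurs in sizes, its key is in store,
-- and an available size is probed before any missing key or before a short list's end would raise
-- IndexError), further restricted to inputs whose first index of size is < 5: beyond that A still
-- returns, but its result depends on its hard-coded bound of 5 (see the cite in claim.json).
def Pre_optimalsize (store : List (String × Int)) (size : String) (sizes : List String) : Prop :=
  size ∈ sizes ∧
  (PySem.List.index? sizes size).getD 0 < 5 ∧
  ((PySem.Dict.mk store).get? size).isSome = true ∧
  (∀ j ∈ List.range 5, j < sizes.length →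
      (PySem.Dict.mk store).get? (sizes.getD j "") = none →
      pvOkBefore store sizes (sizes.idxOf size) (pvPos (sizes.idxOf size) j) = true) ∧
  (sizes.length < 5 →
      pvOkBefore store sizes (sizes.idxOf size) (2 * (sizes.length - sizes.idxOf size) - 1) = true)
instance (store : List (String × Int)) (size : String) (sizes : List String) : Decidable (Pre_optimalsize store size sizes) := by unfold Pre_optimalsize; infer_instance

def pvWitness_optimalsize : (List (String × Int)) × String × List String :=
  ([("S", 1), ("M", 0), ("L", 2), ("XL", 1), ("XXL", 3)], "M", ["S", "M", "L", "XL", "XXL"])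

def Spec_optimalsize (store : List (String × Int)) (size : String) (sizes : List String) (out : Option String) : Prop := out = optimalsize_alt store size sizes
instance (store : List (String × Int)) (size : String) (sizes : List String) (out : Option String) : Decidable (Spec_optimalsize store size sizes out) := by unfold Spec_optimalsize; infer_instance

-- ===== CLAIM (what is proved, stated in full; the proofs are below) =====
def Claim_equal_optimalsize : Prop := ∀ (store : List (String × Int)) (size : String) (sizes : List String), Dom_optimalsize store size sizes → Pre_optimalsize store size sizes → Spec_optimalsize store size sizes (optimalsize store size sizes)

-- ===== LEMMAS AND PROOFS =====

-- one probe of index i, then continue with `cont` (the common shape of both ports' steps)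
def pvProbeThen (store : List (String × Int)) (sizes : List String) (i : Int) (cont : Option String) : Option String :=
  match PySem.List.pyGet? sizes i with
  | none => none
  | some s =>
    match (PySem.Dict.mk store).get? s with
    | none => none
    | some v => if 0 < v then some s else cont

theorem loopA_both (store : List (String × Int)) (sizes : List String) (l r : Int)
    (hl : l > -1) (hr : r < 5) :
    optimalsizeLoopA store sizes l r =
      pvProbeThen store sizes r (pvProbeThen store sizes l (optimalsizeLoopA store sizes (l - 1) (r + 1))) := by
  rw [optimalsizeLoopA]; simp [pvProbeThen, hl, hr]

theorem loopA_r (store : List (String × Int)) (sizes : List String) (l r : Int)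
    (hl : ¬ l > -1) (hr : r < 5) :
    optimalsizeLoopA store sizes l r =
      pvProbeThen store sizes r (optimalsizeLoopA store sizes l (r + 1)) := by
  rw [optimalsizeLoopA]; simp [pvProbeThen, hl, hr]

theorem loopA_l (store : List (String × Int)) (sizes : List String) (l r : Int)
    (hl : l > -1) (hr : ¬ r < 5) :
    optimalsizeLoopA store sizes l r =
      pvProbeThen store sizes l (optimalsizeLoopA store sizes (l - 1) r) := by
  rw [optimalsizeLoopA]; simp [pvProbeThen, hl, hr]

theorem loopA_stop (store : List (String × Int)) (sizes : List String) (l r : Int)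
    (hl : ¬ l > -1) (hr : ¬ r < 5) :
    optimalsizeLoopA store sizes l r = none := by
  rw [optimalsizeLoopA]; simp [hl, hr]

theorem optimalsize_order (ind : Int) (hi : 0 ≤ ind) (hi5 : ind < 5) :
    PySem.List.sorted2 (PySem.List.pyRange 0 5 1) (fun i => |i - ind|) (fun i => -i) =
      if ind = 0 then [0, 1, 2, 3, 4] else if ind = 1 then [1, 2, 0, 3, 4]
      else if ind = 2 then [2, 3, 1, 4, 0] else if ind = 3 then [3, 4, 2, 1, 0]
      else [4, 3, 2, 1, 0] := by
  interval_cases ind <;> decide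

-- ===== VERDICT (by name: the statement is the Claim_ definition above) =====

theorem optimalsize_spec : Claim_equal_optimalsize := by
  intro store size sizes _hdom hpre
  obtain ⟨hmem, hlt, -, -, -⟩ := hpre
  unfold Spec_optimalsize optimalsize optimalsize_alt
  cases hind : PySem.List.index? sizes size with
  | none => rfl
  | some k =>
      obtain ⟨hk, hsk, -⟩ := PySem.List.getElem_of_index?_eq_some hind
      rw [hind] at hlt
      simp only [Option.getD_some] at hlt
      have hpg : PySem.List.pyGet? sizes (k : Int) = some size := by
        rw [PySem.List.pyGet?_natCast]
        simp [List.getElem?_eq_getElem hk, hsk]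
      dsimp only
      rw [optimalsize_order (k : Int) (by positivity) (by exact_mod_cast hlt)]
      interval_cases k <;> norm_num at hpg ⊢ <;>
        simp [hpg, loopA_both, loopA_r, loopA_l, loopA_stop, optimalsizeScanB, pvProbeThen]
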